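-- pv_equiv track=rewrite | github.com/thierrydrmv/CS50-HARVARD-PYTHON | exercises/10.decomposition.py | remove_last_vowel
-- ===== SOURCE A (Python) =====
-- def remove_last_vowel(string):
--     inverted_string = invert_string(string)
--
--     new_string = ""
--     counter = 0
--     for i in inverted_string:
--         if i in vowels() and counter == 0:
--             counter += 1
--             continue
--         new_string += i
--     return invert_string(new_string)
--
-- def invert_string(string):
--     new_string = ""
--     for i in range(len(string) - 1, -1, -1):
--         new_string += string[i]
--     return new_string
--
-- def vowels():
--     return ["a", "e", "i", "o", "u"]
-- ===== SOURCE B (Python) =====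
-- def remove_last_vowel(string):
--     idx = -1
--     for i, ch in enumerate(string):
--         if ch in "aeiou":
--             idx = i
--     if idx == -1:
--         return string
--     return string[:idx] + string[idx + 1:]
-- ===== Notes on version B (the rewrite author's own statement) =====
-- stated objective: faster
-- what changed: Replaces A's two string reversals and char-by-char rebuild (quadratic += concatenation) with a single forward scan recording the index of the last vowel followed by one slice concatenation string[:idx] + string[idx+1:].
import Mathlib
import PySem

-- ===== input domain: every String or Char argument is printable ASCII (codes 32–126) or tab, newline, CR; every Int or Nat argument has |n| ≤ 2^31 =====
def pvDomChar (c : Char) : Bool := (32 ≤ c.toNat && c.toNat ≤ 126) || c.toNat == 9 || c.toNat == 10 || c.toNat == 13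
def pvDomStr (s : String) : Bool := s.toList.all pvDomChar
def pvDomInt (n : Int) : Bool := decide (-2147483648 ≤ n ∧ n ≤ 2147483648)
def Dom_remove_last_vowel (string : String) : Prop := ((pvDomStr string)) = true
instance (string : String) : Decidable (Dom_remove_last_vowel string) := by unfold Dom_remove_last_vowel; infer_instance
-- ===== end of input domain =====

-- B replaces A's two string reversals and char-by-char rebuild with one forward scan for the
-- index of the last vowel followed by a single slice concatenation (objective: simpler).

-- ===== PORT A =====
def pvVowels : List Char := ['a', 'e', 'i', 'o', 'u']

-- helper invert_string: new_string = ""; for i in range(len(string)-1, -1, -1): new_string += string[i]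
def pvInvertString (s : List Char) : List Char :=
  (PySem.List.pyRange ((s.length : Int) - 1) (-1) (-1)).foldl
    (fun acc i => acc ++ [PySem.List.pyGetD s i ' ']) []

def remove_last_vowel (string : String) : String :=
  let inverted := pvInvertString string.toList
  let st := inverted.foldl
    (fun (st : List Char × Int) c =>
      if c ∈ pvVowels ∧ st.2 = 0 then (st.1, st.2 + 1) else (st.1 ++ [c], st.2))
    ([], 0)
  String.ofList (pvInvertString st.1)

-- ===== PORT B =====
def remove_last_vowel_alt (string : String) : String :=
  let l := string.toList
  let idx : Int := (PySem.List.enumerate l 0).foldl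
    (fun idx p => if p.2 ∈ ['a', 'e', 'i', 'o', 'u'] then p.1 else idx) (-1)
  if idx = -1 then string
  else String.ofList (PySem.List.slice l none (some idx) ++ PySem.List.slice l (some (idx + 1)) none)

-- ===== PRECONDITION & SPEC =====
def Spec_remove_last_vowel (string : String) (out : String) : Prop := out = remove_last_vowel_alt string
instance (string : String) (out : String) : Decidable (Spec_remove_last_vowel string out) := by unfold Spec_remove_last_vowel; infer_instance

-- ===== CLAIM (what is proved, stated in full; the proofs are below) =====
def Claim_equal_remove_last_vowel : Prop := ∀ (string : String), Dom_remove_last_vowel string → Spec_remove_last_vowel string (remove_last_vowel string)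

-- ===== LEMMAS AND PROOFS =====

-- invert_string is reversal
theorem pvInvertString_eq (l : List Char) : pvInvertString l = l.reverse := by
  unfold pvInvertString
  rw [PySem.List.pyRange_neg_one]
  have h1 : (((l.length : Int) - 1) - (-1)).toNat = l.length := by omega
  rw [h1, List.foldl_map, PySem.List.foldl_append_singleton_eq_map]
  simp only [List.nil_append]
  apply List.ext_getElem
  · simp
  · intro i h1' h2'
    have hlen : i < l.length := by simpa using h1'
    simp only [List.getElem_map, List.getElem_range, List.getElem_reverse]
    have hc : ((l.length : Int) - 1 - (i : Int)) = ((l.length - 1 - i : Nat) : Int) := by omega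
    rw [hc, PySem.List.pyGetD_natCast, List.getD_eq_getElem _ _ (by omega)]

-- drop-first-vowel on a list
def pvDff : List Char → List Char
  | [] => []
  | c :: t => if c ∈ pvVowels then t else c :: pvDff t

-- A's strip loop, once the counter is nonzero, copies everything
theorem pvFoldA_one (l : List Char) (acc : List Char) (k : Int) (hk : k ≠ 0) :
    l.foldl (fun (st : List Char × Int) c =>
      if c ∈ pvVowels ∧ st.2 = 0 then (st.1, st.2 + 1) else (st.1 ++ [c], st.2)) (acc, k)
    = (acc ++ l, k) := by
  induction l generalizing acc with
  | nil => simp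
  | cons c t ih =>
    simp only [List.foldl_cons]
    rw [if_neg (by simp [hk])]
    rw [ih (acc ++ [c])]
    simp

-- A's strip loop from counter 0 computes pvDff
theorem pvFoldA_zero (l : List Char) (acc : List Char) :
    l.foldl (fun (st : List Char × Int) c =>
      if c ∈ pvVowels ∧ st.2 = 0 then (st.1, st.2 + 1) else (st.1 ++ [c], st.2)) (acc, 0)
    = if ∀ c ∈ l, c ∉ pvVowels then (acc ++ l, 0) else (acc ++ pvDff l, 1) := by
  induction l generalizing acc with
  | nil => simp
  | cons c t ih =>
    simp only [List.foldl_cons]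
    by_cases hc : c ∈ pvVowels
    · rw [if_pos (by simp [hc])]
      rw [pvFoldA_one t acc (0 + 1) (by omega)]
      rw [if_neg (by push_neg; exact ⟨c, by simp, hc⟩)]
      simp [pvDff, hc]
    · rw [if_neg (by simp [hc])]
      rw [ih (acc ++ [c])]
      by_cases ht : ∀ x ∈ t, x ∉ pvVowels
      · rw [if_pos ht, if_pos (by intro x hx; rw [List.mem_cons] at hx; rcases hx with rfl | hx; exacts [hc, ht x hx])]
        simp
      · rw [if_neg ht, if_neg (by intro hall; exact ht (fun x hx => hall x (List.mem_cons_of_mem c hx)))]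
        simp [pvDff, hc]

-- if the first vowel is at index j, pvDff removes exactly it
theorem pvDff_findIdx (m : List Char) (j : Nat)
    (h : m.findIdx? (fun c => decide (c ∈ pvVowels)) = some j) :
    pvDff m = m.take j ++ m.drop (j + 1) := by
  induction m generalizing j with
  | nil => simp at h
  | cons c t ih =>
    rw [List.findIdx?_cons] at h
    by_cases hc : c ∈ pvVowels
    · simp [hc] at h
      subst h
      simp [pvDff, hc]
    · simp [hc] at h
      obtain ⟨j', hj', rfl⟩ := h
      simp [pvDff, hc, ih j' hj', List.take_succ_cons, List.drop_succ_cons]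

-- last-vowel index
def pvLastIdx? (l : List Char) : Option Nat :=
  (l.reverse.findIdx? (fun c => decide (c ∈ pvVowels))).map (fun j => l.length - 1 - j)

theorem pvLastIdx?_append_vowel (t : List Char) (c : Char) (hc : c ∈ pvVowels) :
    pvLastIdx? (t ++ [c]) = some t.length := by
  unfold pvLastIdx?
  rw [List.reverse_append]
  simp [List.findIdx?_cons, hc]

theorem pvLastIdx?_append_nonvowel (t : List Char) (c : Char) (hc : c ∉ pvVowels) :
    pvLastIdx? (t ++ [c]) = pvLastIdx? t := by
  unfold pvLastIdx?
  rw [List.reverse_append]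
  simp only [List.reverse_singleton, List.singleton_append, List.findIdx?_cons]
  rw [if_neg (by simpa using hc)]
  cases hf : t.reverse.findIdx? (fun c => decide (c ∈ pvVowels)) with
  | none => simp
  | some j =>
    simp
    omega

-- B's scan computes the last-vowel index
theorem pvFoldB (l : List Char) (s : Int) (init : Int) :
    (PySem.List.enumerate l s).foldl
      (fun idx p => if p.2 ∈ pvVowels then p.1 else idx) init
    = match pvLastIdx? l with
      | none => init
      | some k => s + (k : Int) := by
  induction l using List.reverseRecOn generalizing init with
  | nil => simp [pvLastIdx?, PySem.List.enumerate_nil]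
  | append_singleton t c ih =>
    rw [PySem.List.enumerate_append, List.foldl_append, ih]
    simp only [PySem.List.enumerate_cons, PySem.List.enumerate_nil, List.foldl_cons, List.foldl_nil]
    by_cases hc : c ∈ pvVowels
    · rw [pvLastIdx?_append_vowel t c hc]
      cases hlast : pvLastIdx? t <;> simp [hc]
    · rw [pvLastIdx?_append_nonvowel t c hc]
      cases hlast : pvLastIdx? t <;> simp [hc]

theorem pvFindIdx?_lt_length {m : List Char} {j : Nat}
    (h : m.findIdx? (fun c => decide (c ∈ pvVowels)) = some j) : j < m.length := by
  have := List.findIdx?_eq_some_iff_findIdx_eq.mp h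
  omega

theorem pvFindIdx?_vowel {m : List Char} {j : Nat}
    (h : m.findIdx? (fun c => decide (c ∈ pvVowels)) = some j) (hj : j < m.length) :
    m[j] ∈ pvVowels := by
  have h1 := List.findIdx?_eq_some_iff_findIdx_eq.mp h
  have h2 := List.findIdx_getElem (xs := m) (p := fun c => decide (c ∈ pvVowels)) (w := by omega)
  simpa [h1.2] using h2

-- ===== VERDICT (by name: the statement is the Claim_ definition above) =====
theorem remove_last_vowel_spec : Claim_equal_remove_last_vowel := by
  intro s _
  unfold Spec_remove_last_vowel remove_last_vowel remove_last_vowel_alt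
  simp only [pvInvertString_eq]
  set l := s.toList with hl
  rw [pvFoldA_zero]
  rw [show ['a', 'e', 'i', 'o', 'u'] = pvVowels from rfl]
  have hfold := pvFoldB l 0 (-1)
  cases hlast : pvLastIdx? l with
  | none =>
    rw [hlast] at hfold
    simp only [] at hfold
    simp only [pvLastIdx?, Option.map_eq_none_iff] at hlast
    have hnv : ∀ c ∈ l.reverse, c ∉ pvVowels := by
      intro c hc
      have := List.findIdx?_eq_none_iff.mp hlast c hc
      simpa using this
    rw [hfold, if_pos hnv]
    simp [hl]
  | some k =>
    rw [hlast] at hfold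
    simp only [pvLastIdx?, Option.map_eq_some_iff] at hlast
    obtain ⟨j, hf, hk⟩ := hlast
    have hj : j < l.length := by
      have := pvFindIdx?_lt_length hf
      simpa using this
    have hpv : l.reverse[j]'(by simpa using hj) ∈ pvVowels :=
      pvFindIdx?_vowel hf (by simpa using hj)
    have hnv : ¬ ∀ c ∈ l.reverse, c ∉ pvVowels := by
      push_neg
      exact ⟨_, List.getElem_mem _, hpv⟩
    rw [if_neg hnv]
    rw [pvDff_findIdx l.reverse j hf]
    have hfold' : (PySem.List.enumerate l 0).foldl
        (fun idx p => if p.2 ∈ pvVowels then p.1 else idx) (-1) = ((k : Nat) : Int) := by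
      rw [hfold]; show (0 : Int) + (k : Int) = ((k : Nat) : Int); omega
    rw [hfold']
    have hne : ((k : Nat) : Int) ≠ -1 := by omega
    rw [if_neg hne]
    have h2 : ((k : Nat) : Int) + 1 = (((k + 1) : Nat) : Int) := by push_cast; ring
    rw [PySem.List.slice_to_natCast, h2, PySem.List.slice_from_natCast]
    simp only [List.nil_append]
    congr 1
    rw [List.reverse_append, List.reverse_take, List.reverse_drop,
        List.reverse_reverse, List.length_reverse]
    congr 2 <;> omega
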